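-- pv_equiv track=rewrite | github.com/vikramjit-sidhu/algorithms | hacker_rank/greedy/grid_challenge.py | check_col_lexicographic_order
-- ===== SOURCE A (Python) =====
-- def check_col_lexicographic_order(char_grid, col_num):
--     """ In char_grid, checks lexicographic ordering of a column """
--     # the first char in col_num, using it as a base of comparision
--     curr_char = char_grid[0][col_num]
--     row_num = 1
--     while row_num < len(char_grid):
--         if curr_char > char_grid[row_num][col_num]:
--             return False
--         curr_char = char_grid[row_num][col_num]
--         row_num += 1
--     return True
-- ===== SOURCE B (Python) =====
-- def check_col_lexicographic_order(char_grid, col_num):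
--     """ In char_grid, checks lexicographic ordering of a column """
--     col = [row[col_num] for row in char_grid]
--     return col == sorted(col)
-- ===== Notes on version B (the rewrite author's own statement) =====
-- stated objective: simpler
-- what changed: Replaces A's stateful adjacent-pair while-loop with building the column as a list and comparing it to its sorted copy.
-- outside the precondition, e.g. on check_col_lexicographic_order(['b', 'a', ''], 0): A returns False, B raises IndexError
import Mathlib
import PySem

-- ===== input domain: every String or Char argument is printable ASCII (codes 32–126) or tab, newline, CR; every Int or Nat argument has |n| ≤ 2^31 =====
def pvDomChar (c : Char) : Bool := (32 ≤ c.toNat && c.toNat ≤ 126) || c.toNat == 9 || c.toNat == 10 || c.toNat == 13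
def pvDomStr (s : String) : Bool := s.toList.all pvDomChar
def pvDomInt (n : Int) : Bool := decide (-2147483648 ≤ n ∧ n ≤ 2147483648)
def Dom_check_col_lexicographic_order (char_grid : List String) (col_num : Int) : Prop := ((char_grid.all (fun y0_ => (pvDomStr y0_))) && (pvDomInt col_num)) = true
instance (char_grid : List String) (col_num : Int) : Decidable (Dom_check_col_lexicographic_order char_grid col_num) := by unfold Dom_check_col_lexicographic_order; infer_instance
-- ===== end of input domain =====

-- B builds the column as a list and compares it with its sorted copy, replacing A's
-- stateful adjacent-pair scan (objective: simpler).


-- ===== PORT A =====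
-- the while loop: curr_char and the remaining rows are the loop state
def pvLoopA (col_num : Int) (curr : Char) : List String → Bool
  | [] => true
  | r :: rest =>
    match PySem.Str.pyGet? r col_num with
    | none => false   -- Python raises IndexError here; such inputs are outside Pre_
    | some ch => if curr > ch then false else pvLoopA col_num ch rest

def check_col_lexicographic_order (char_grid : List String) (col_num : Int) : Bool :=
  match char_grid with
  | [] => false       -- char_grid[0][col_num] raises IndexError; outside Pre_
  | r0 :: rest =>
    match PySem.Str.pyGet? r0 col_num with
    | none => false   -- IndexError; outside Pre_
    | some ch => pvLoopA col_num ch rest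

-- ===== PORT B =====
def check_col_lexicographic_order_alt (char_grid : List String) (col_num : Int) : Bool :=
  -- col = [row[col_num] for row in char_grid]; .getD is total, Pre_ guarantees a valid index
  let col := char_grid.map (fun row => (PySem.Str.pyGet? row col_num).getD ' ')
  col == PySem.List.sorted col (fun x => x) false

-- ===== PRECONDITION & SPEC =====
-- Pre_ requires a nonempty grid and col_num a valid Python index into EVERY row: on the
-- empty grid A raises IndexError (while B returns True), and when some row is too short A either raises or (if an
-- earlier pair is already out of order) returns False while B, which reads the whole
-- column first, raises IndexError there.
def Pre_check_col_lexicographic_order (char_grid : List String) (col_num : Int) : Prop :=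
  char_grid ≠ [] ∧ ∀ s ∈ char_grid, PySem.Raise.InRange s.toList.length col_num
instance (char_grid : List String) (col_num : Int) : Decidable (Pre_check_col_lexicographic_order char_grid col_num) := by unfold Pre_check_col_lexicographic_order; infer_instance

def pvWitness_check_col_lexicographic_order : List String × Int := (["abc", "abd", "acd"], 1)

def Spec_check_col_lexicographic_order (char_grid : List String) (col_num : Int) (out : Bool) : Prop := out = check_col_lexicographic_order_alt char_grid col_num
instance (char_grid : List String) (col_num : Int) (out : Bool) : Decidable (Spec_check_col_lexicographic_order char_grid col_num out) := by unfold Spec_check_col_lexicographic_order; infer_instance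

-- ===== CLAIM (what is proved, stated in full; the proofs are below) =====
def Claim_equal_check_col_lexicographic_order : Prop := ∀ (char_grid : List String) (col_num : Int), Dom_check_col_lexicographic_order char_grid col_num → Pre_check_col_lexicographic_order char_grid col_num → Spec_check_col_lexicographic_order char_grid col_num (check_col_lexicographic_order char_grid col_num)

-- ===== LEMMAS AND PROOFS =====

-- the column B builds
def pvCol (char_grid : List String) (col_num : Int) : List Char :=
  char_grid.map (fun row => (PySem.Str.pyGet? row col_num).getD ' ')

theorem pvGet_some (r : String) (col_num : Int)
    (hr : PySem.Raise.InRange r.toList.length col_num) :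
    PySem.Str.pyGet? r col_num = some ((PySem.Str.pyGet? r col_num).getD ' ') := by
  cases hg : PySem.Str.pyGet? r col_num with
  | none =>
    have : PySem.List.pyGet? r.toList col_num = none := by simpa using hg
    exact absurd hr ((PySem.List.pyGet?_eq_none_iff _ _).mp this)
  | some c => rfl

theorem pvLoopA_eq_chain (col_num : Int) (rows : List String) (curr : Char)
    (h : ∀ s ∈ rows, PySem.Raise.InRange s.toList.length col_num) :
    pvLoopA col_num curr rows = decide (List.IsChain (· ≤ ·) (curr :: pvCol rows col_num)) := by
  induction rows generalizing curr with
  | nil => simp [pvLoopA, pvCol]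
  | cons r rest ih =>
    obtain ⟨ch, hch⟩ : ∃ ch, PySem.Str.pyGet? r col_num = some ch :=
      ⟨_, pvGet_some r col_num (h r (by simp))⟩
    have hrest := ih ch (fun s hs => h s (by simp [hs]))
    have hch' : PySem.List.pyGet? r.toList col_num = some ch := by simpa using hch
    have hcol : pvCol (r :: rest) col_num = ch :: pvCol rest col_num := by
      simp [pvCol, hch']
    rw [hcol]
    simp only [pvLoopA, hch]
    by_cases hgt : curr > ch
    · have hnc : ¬ List.IsChain (· ≤ ·) (curr :: ch :: pvCol rest col_num) := by
        rw [List.isChain_cons_cons]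
        exact fun hp => absurd hp.1 (not_le.mpr hgt)
      rw [if_pos hgt]
      exact (decide_eq_false hnc).symm
    · have hle : curr ≤ ch := not_lt.mp hgt
      rw [if_neg hgt, hrest]
      exact decide_eq_decide.mpr
        ((and_iff_right hle).symm.trans List.isChain_cons_cons.symm)

theorem pvAlt_eq_chain (char_grid : List String) (col_num : Int) :
    check_col_lexicographic_order_alt char_grid col_num
      = decide (List.IsChain (· ≤ ·) (pvCol char_grid col_num)) := by
  have hpc : List.IsChain (· ≤ ·) (pvCol char_grid col_num)
      ↔ (pvCol char_grid col_num).Pairwise (· ≤ ·) := List.isChain_iff_pairwise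
  show (pvCol char_grid col_num
      == PySem.List.sorted (pvCol char_grid col_num) (fun x => x) false) = _
  by_cases hc : List.IsChain (· ≤ ·) (pvCol char_grid col_num)
  · have := PySem.List.sorted_eq_self_of_pairwise (xs := pvCol char_grid col_num)
      (key := fun x => x) (hpc.mp hc)
    simp [this, hc]
  · have hne : pvCol char_grid col_num
        ≠ PySem.List.sorted (pvCol char_grid col_num) (fun x => x) false := by
      intro he
      exact hc (hpc.mpr (by
        have := PySem.List.sorted_pairwise (xs := pvCol char_grid col_num)
          (key := fun x => x)
        rw [he]; simpa using this))
    simp [hc, hne]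

-- ===== VERDICT (by name: the statement is the Claim_ definition above) =====
theorem check_col_lexicographic_order_spec : Claim_equal_check_col_lexicographic_order := by
  intro char_grid col_num _ hpre
  obtain ⟨hne, hall⟩ := hpre
  unfold Spec_check_col_lexicographic_order
  match char_grid, hne with
  | r0 :: rest, _ =>
    obtain ⟨ch, hch⟩ : ∃ ch, PySem.Str.pyGet? r0 col_num = some ch :=
      ⟨_, pvGet_some r0 col_num (hall r0 (by simp))⟩
    rw [pvAlt_eq_chain]
    simp only [check_col_lexicographic_order, hch]
    rw [pvLoopA_eq_chain col_num rest ch (fun s hs => hall s (by simp [hs]))]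
    have hch' : PySem.List.pyGet? r0.toList col_num = some ch := by simpa using hch
    have hcol : pvCol (r0 :: rest) col_num = ch :: pvCol rest col_num := by
      simp [pvCol, hch']
    rw [hcol]
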